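-- pv_equiv track=rewrite | github.com/Idealm99/CodingTest | 프로그래머스/1/142086. 가장 가까운 같은 글자/가장 가까운 같은 글자.py | solution
-- ===== SOURCE A (Python) =====
-- def solution(s):
--     dick = {}
--     li =[]
--     for idx, ap in enumerate(s):
--         if ap in dick:
--             li.append(idx-dick[ap])
--
--         else:
--             li.append(-1)
--         dick[ap]=idx
--     return li
-- ===== SOURCE B (Python) =====
-- def solution(s):
--     # No last-seen dict: for each character, rescan the already-seen prefix
--     # backwards; the distance is 1 + the number of steps to the previous occurrence.
--     seen = []
--     out = []
--     for ch in s: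
--         d = -1
--         for k, c in enumerate(reversed(seen)):
--             if c == ch:
--                 d = k + 1
--                 break
--         out.append(d)
--         seen.append(ch)
--     return out
-- ===== Notes on version B (the rewrite author's own statement) =====
-- stated objective: alternative
-- what changed: Replaces the maintained last-seen-index dict by a backward rescan of the already-seen prefix: the distance to the previous occurrence is read off directly as the number of steps back to the first match, so no index table is kept.
import Mathlib
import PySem

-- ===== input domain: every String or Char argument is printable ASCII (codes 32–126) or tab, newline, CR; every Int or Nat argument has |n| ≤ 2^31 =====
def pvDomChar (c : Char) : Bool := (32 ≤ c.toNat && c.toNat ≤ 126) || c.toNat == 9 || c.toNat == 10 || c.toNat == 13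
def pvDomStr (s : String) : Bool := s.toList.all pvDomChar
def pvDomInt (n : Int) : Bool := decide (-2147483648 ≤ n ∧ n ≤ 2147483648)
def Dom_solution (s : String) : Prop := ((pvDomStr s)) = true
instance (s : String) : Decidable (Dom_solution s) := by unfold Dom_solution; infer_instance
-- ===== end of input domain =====

-- B drops A's last-seen-index dict: it rescans the already-seen prefix backwards and reads the
-- distance off as the steps to the previous occurrence (objective: alternative).

-- ===== PORT A =====
-- loop 'for idx, ap in enumerate(s)' with dict `dick` and output list `li`
def solutionGo (d : PySem.Dict Char Int) (li : List Int) (idx : Int) : List Char → List Int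
  | [] => li
  | ap :: rest =>
      let li' := match d.get? ap with
        | some j => li ++ [idx - j]     -- ap in dick: append idx - dick[ap]
        | none   => li ++ [-1]
      solutionGo (d.insert ap idx) li' (idx + 1) rest

def solution (s : String) : List Int :=
  solutionGo PySem.Dict.empty [] 0 s.toList

-- ===== PORT B =====
-- inner loop 'for k, c in enumerate(reversed(seen)): if c == ch: d = k+1; break'
-- (first match in the reversed prefix, ported as index? on seen.reverse)
def solutionAltGo (seen : List Char) : List Char → List Int
  | [] => []
  | ch :: rest =>
      (match PySem.List.index? seen.reverse ch with
        | some k => (k : Int) + 1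
        | none   => -1) :: solutionAltGo (seen ++ [ch]) rest

def solution_alt (s : String) : List Int :=
  solutionAltGo [] s.toList

-- ===== PRECONDITION & SPEC =====
def Spec_solution (s : String) (out : List Int) : Prop := out = solution_alt s
instance (s : String) (out : List Int) : Decidable (Spec_solution s out) := by unfold Spec_solution; infer_instance

-- ===== CLAIM (what is proved, stated in full; the proofs are below) =====
def Claim_equal_solution : Prop := ∀ (s : String), Dom_solution s → Spec_solution s (solution s)

-- ===== LEMMAS AND PROOFS =====

-- Invariant: the dict maps each char to the absolute index of its most recent occurrence,
-- which is (seen.length - 1 - k) where k is its position in the reversed seen prefix.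
theorem solutionGo_eq (l : List Char) :
    ∀ (d : PySem.Dict Char Int) (seen : List Char) (li : List Int),
      (∀ c, d.get? c = (PySem.List.index? seen.reverse c).map
          (fun (k : Nat) => ((seen.length : Int) - 1 - (k : Int)))) →
      solutionGo d li (seen.length : Int) l = li ++ solutionAltGo seen l := by
  induction l with
  | nil => intro d seen li _; simp [solutionGo, solutionAltGo]
  | cons ap rest ih =>
    intro d seen li hinv
    have hrev : (seen ++ [ap]).reverse = ap :: seen.reverse := by simp
    have hlen : (((seen ++ [ap]).length : Nat) : Int) = (seen.length : Int) + 1 := by simp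
    have hinv' : ∀ c, (d.insert ap (seen.length : Int)).get? c =
        (PySem.List.index? (seen ++ [ap]).reverse c).map
          (fun (k : Nat) => (((seen ++ [ap]).length : Int) - 1 - (k : Int))) := by
      intro c
      rw [PySem.Dict.get?_insert, hrev]
      by_cases hc : c = ap
      · subst hc
        rw [PySem.List.index?_cons_self, if_pos rfl, Option.map_some]
        congr 1
        rw [hlen]
        ring
      · have hne : ap ≠ c := fun h => hc h.symm
        rw [PySem.List.index?_cons_of_ne seen.reverse hne, if_neg hc, hinv c, Option.map_map]
        cases PySem.List.index? seen.reverse c with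
        | none => simp
        | some k =>
          simp only [Option.map_some, Function.comp]
          congr 1
          rw [hlen]
          push_cast
          ring
    have hstep := ih (d.insert ap (seen.length : Int)) (seen ++ [ap])
    simp only [solutionGo, solutionAltGo]
    rw [hinv ap]
    cases hk : PySem.List.index? seen.reverse ap with
    | none =>
      have h := hstep (li ++ [-1]) hinv'
      rw [hlen] at h
      simp only [Option.map_none]
      rw [h, List.append_assoc]
      rfl
    | some k =>
      have h := hstep (li ++ [(seen.length : Int) - ((seen.length : Int) - 1 - (k : Int))]) hinv'
      rw [hlen] at h
      simp only [Option.map_some]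
      rw [h, List.append_assoc]
      have : (seen.length : Int) - ((seen.length : Int) - 1 - (k : Int)) = (k : Int) + 1 := by ring
      rw [this]
      rfl

-- ===== VERDICT (by name: the statement is the Claim_ definition above) =====
theorem solution_spec : Claim_equal_solution := by
  intro s _
  unfold Spec_solution solution solution_alt
  have h := solutionGo_eq s.toList PySem.Dict.empty [] [] (by
    intro c; simp [PySem.Dict.get?_empty, PySem.List.index?])
  simpa using h
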